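-- pv_equiv track=rewrite | github.com/KirillKleshchev1/tocka | run.py | gen_leonard_numbers
-- ===== SOURCE A (Python) =====
-- def gen_leonard_numbers(num: int) -> list:
--     num1 = num2 = 1
--     res = []
--     while num1 <= num:
--         res.append(num1)
--         num1 = num2
--         num2 = num1 + res[-1] + 1
--     return res
-- ===== SOURCE B (Python) =====
-- def gen_leonard_numbers(num: int) -> list:
--     # Recursively build the list front-to-back from a Fibonacci pair,
--     # using the identity Leonardo(n) = 2*Fib(n+1) - 1 (no accumulator,
--     # no Leonardo recurrence).
--     def go(f1, f2):
--         leo = 2 * f1 - 1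
--         if leo > num:
--             return []
--         return [leo] + go(f2, f1 + f2)
--     return go(1, 1)
-- ===== Notes on version B (the rewrite author's own statement) =====
-- stated objective: alternative
-- what changed: B builds the list by structural recursion (cons, no accumulator) over a Fibonacci pair, deriving each term via Leonardo(n)=2*Fib(n+1)-1, instead of A's imperative while loop appending terms of the Leonardo recurrence to a result list.
import Mathlib
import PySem

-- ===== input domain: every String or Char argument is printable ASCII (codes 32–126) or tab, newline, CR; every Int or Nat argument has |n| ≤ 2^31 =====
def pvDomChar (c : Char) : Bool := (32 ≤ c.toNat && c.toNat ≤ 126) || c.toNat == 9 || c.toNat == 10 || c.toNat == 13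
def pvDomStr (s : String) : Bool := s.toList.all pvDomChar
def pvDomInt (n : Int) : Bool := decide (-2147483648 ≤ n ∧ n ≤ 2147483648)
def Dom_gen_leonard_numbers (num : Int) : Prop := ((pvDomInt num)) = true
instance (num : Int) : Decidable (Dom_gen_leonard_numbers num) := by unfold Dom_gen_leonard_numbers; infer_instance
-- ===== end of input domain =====

-- B recursively conses terms derived from a Fibonacci pair via Leonardo(n) = 2*Fib(n+1) - 1,
-- instead of A's accumulator loop on the Leonardo recurrence (alternative, same cost).

-- ===== PORT A =====
-- A's while loop as fuel recursion over A's state (num1, num2, res); the fuel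
-- (num.toNat + 2) only guards totality and is never exhausted (appended values are
-- ≥ 1 and strictly increasing from the second step on, so ≤ num+1 iterations run).
def genLeonardLoopA (fuel : Nat) (num num1 num2 : Int) (res : List Int) : List Int :=
  match fuel with
  | 0 => res
  | f + 1 =>
    if num1 ≤ num then
      genLeonardLoopA f num num2 (num2 + num1 + 1) (res ++ [num1])
    else res

def gen_leonard_numbers (num : Int) : List Int :=
  genLeonardLoopA (num.toNat + 2) num 1 1 []

-- ===== PORT B =====
-- Source B's recursive helper go(f1, f2); same fuel bound, never exhausted.
def genLeoGo (fuel : Nat) (num f1 f2 : Int) : List Int :=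
  match fuel with
  | 0 => []
  | f + 1 =>
    let leo := 2 * f1 - 1
    if leo > num then []
    else leo :: genLeoGo f num f2 (f1 + f2)

def gen_leonard_numbers_alt (num : Int) : List Int :=
  genLeoGo (num.toNat + 2) num 1 1

-- ===== PRECONDITION & SPEC =====
def Spec_gen_leonard_numbers (num : Int) (out : List Int) : Prop := out = gen_leonard_numbers_alt num
instance (num : Int) (out : List Int) : Decidable (Spec_gen_leonard_numbers num out) := by unfold Spec_gen_leonard_numbers; infer_instance

-- ===== CLAIM (what is proved, stated in full; the proofs are below) =====
def Claim_equal_gen_leonard_numbers : Prop := ∀ (num : Int), Dom_gen_leonard_numbers num → Spec_gen_leonard_numbers num (gen_leonard_numbers num)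

-- ===== LEMMAS AND PROOFS =====

-- Invariant: A's state (num1, num2) = (2*f1 - 1, 2*f2 - 1) for B's Fibonacci pair
-- (f1, f2); A's loop then produces res ++ (B's recursively built list).
theorem genLeonardLoop_eq (fuel : Nat) (num : Int) :
    ∀ (f1 f2 : Int) (res : List Int),
      genLeonardLoopA fuel num (2 * f1 - 1) (2 * f2 - 1) res =
      res ++ genLeoGo fuel num f1 f2 := by
  induction fuel with
  | zero => intro f1 f2 res; simp [genLeonardLoopA, genLeoGo]
  | succ f ih =>
    intro f1 f2 res
    simp only [genLeonardLoopA, genLeoGo]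
    by_cases h : 2 * f1 - 1 ≤ num
    · rw [if_pos h, if_neg (by omega)]
      have harg : (2 * f2 - 1) + (2 * f1 - 1) + 1 = 2 * (f1 + f2) - 1 := by ring
      rw [harg, ih f2 (f1 + f2)]
      simp
    · rw [if_neg h, if_pos (by omega)]
      simp

-- ===== VERDICT (by name: the statement is the Claim_ definition above) =====
theorem gen_leonard_numbers_spec : Claim_equal_gen_leonard_numbers := by
  intro num _
  unfold Spec_gen_leonard_numbers gen_leonard_numbers gen_leonard_numbers_alt
  have h := genLeonardLoop_eq (num.toNat + 2) num 1 1 []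
  norm_num at h
  exact h
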